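-- pv_equiv track=rewrite | github.com/Pikurrot/computational-logic-project | pythontask0.py | IsAtomicSentence
-- ===== SOURCE A (Python) =====
-- def IsAtomicSentence(expression):
--     numberOfLetters = 0
--     badCharacters = 0
--
--     # First-order logic would be better here...
--     for i in range(len(expression)):
--         c = expression[i]
--         if (not(IsLowerLetter(c) or IsNumber(c))):
--             badCharacters = badCharacters + 1
--         elif (IsLowerLetter(c)):
--             numberOfLetters += 1
--
--     # f = First character of the expression is a letter.
--     f = IsLowerLetter(expression[0]);
--
--     # m = There is more than one letter.
--     m = numberOfLetters > 1;
--
--     # b = Has some Bad Character.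
--     b = badCharacters > 0;
--
--     return f and not m and not b;
--
-- def IsLowerLetter(character):
--     return ord(character) >= 97 and ord(character) <= 122
--
-- def IsNumber(character):
--     return ord(character) >= 48 and ord(character) <= 57
-- ===== SOURCE B (Python) =====
-- def IsAtomicSentence(expression):
--     # Direct structural check: first char is a lowercase letter,
--     # every remaining char is a digit.  (Indexing [0] first so the
--     # empty string raises IndexError just like the original.)
--     return IsLowerLetter(expression[0]) and all(IsNumber(c) for c in expression[1:])
--
-- def IsLowerLetter(character):
--     return ord(character) >= 97 and ord(character) <= 122
--
-- def IsNumber(character):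
--     return ord(character) >= 48 and ord(character) <= 57
-- ===== Notes on version B (the rewrite author's own statement) =====
-- stated objective: simpler
-- what changed: Replaces the two counters (letters, bad characters) and the derived f/m/b threshold booleans with a direct structural check: first character is a lowercase letter and every remaining character is a digit, with early exit on the first non-digit.
import Mathlib
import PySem

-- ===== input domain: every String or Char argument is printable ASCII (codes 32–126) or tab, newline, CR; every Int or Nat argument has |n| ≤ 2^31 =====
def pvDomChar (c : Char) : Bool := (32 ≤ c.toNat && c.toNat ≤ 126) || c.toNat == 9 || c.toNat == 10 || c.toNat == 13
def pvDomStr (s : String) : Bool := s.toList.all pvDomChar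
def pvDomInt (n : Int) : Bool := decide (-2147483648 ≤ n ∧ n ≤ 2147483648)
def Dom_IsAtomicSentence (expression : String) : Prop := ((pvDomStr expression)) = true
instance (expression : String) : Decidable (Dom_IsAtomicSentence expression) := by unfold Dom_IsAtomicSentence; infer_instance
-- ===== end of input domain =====

-- B replaces A's counter-and-threshold logic by a direct check (first char is a
-- lowercase letter, the rest are digits); same O(n) cost, simpler decomposition.


-- ===== PORT A =====
def pyIsLowerLetter (c : Char) : Bool := 97 ≤ c.toNat && c.toNat ≤ 122

def pyIsNumber (c : Char) : Bool := 48 ≤ c.toNat && c.toNat ≤ 57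

-- the for-loop over range(len(expression)) accumulating the two counters
def IsAtomicSentence (expression : String) : Bool :=
  let st := expression.toList.foldl
    (fun (st : Int × Int) c =>
      if !(pyIsLowerLetter c || pyIsNumber c) then (st.1, st.2 + 1)
      else if pyIsLowerLetter c then (st.1 + 1, st.2)
      else st)
    (0, 0)
  match PySem.Str.pyGet? expression 0 with   -- expression[0]; none = IndexError, excluded by Pre_
  | none => false
  | some c0 =>
    let f := pyIsLowerLetter c0
    let m := decide (st.1 > 1)
    let b := decide (st.2 > 0)
    f && !m && !b

-- ===== PORT B =====
def IsAtomicSentence_alt (expression : String) : Bool :=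
  match PySem.Str.pyGet? expression 0 with   -- expression[0]; none = IndexError, excluded by Pre_
  | none => false
  | some c0 => pyIsLowerLetter c0 && (expression.toList.drop 1).all pyIsNumber

-- ===== PRECONDITION & SPEC =====
-- A (and B) raise IndexError on the empty string (expression[0]); exactly that input is excluded.
def Pre_IsAtomicSentence (expression : String) : Prop := expression ≠ ""
instance (expression : String) : Decidable (Pre_IsAtomicSentence expression) := by unfold Pre_IsAtomicSentence; infer_instance
def pvWitness_IsAtomicSentence : String := "p12"

def Spec_IsAtomicSentence (expression : String) (out : Bool) : Prop := out = IsAtomicSentence_alt expression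
instance (expression : String) (out : Bool) : Decidable (Spec_IsAtomicSentence expression out) := by unfold Spec_IsAtomicSentence; infer_instance

-- ===== CLAIM (what is proved, stated in full; the proofs are below) =====
def Claim_equal_IsAtomicSentence : Prop := ∀ (expression : String), Dom_IsAtomicSentence expression → Pre_IsAtomicSentence expression → Spec_IsAtomicSentence expression (IsAtomicSentence expression)

-- ===== LEMMAS AND PROOFS =====

-- the loop computes the two counts, shifted by the starting state
theorem foldl_counts (l : List Char) (a b : Int) :
    l.foldl
      (fun (st : Int × Int) c =>
        if !(pyIsLowerLetter c || pyIsNumber c) then (st.1, st.2 + 1)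
        else if pyIsLowerLetter c then (st.1 + 1, st.2)
        else st)
      (a, b)
    = (a + (l.countP pyIsLowerLetter : Int),
       b + (l.countP (fun c => !(pyIsLowerLetter c || pyIsNumber c)) : Int)) := by
  induction l generalizing a b with
  | nil => simp
  | cons c t ih =>
    simp only [List.foldl_cons]
    by_cases h1 : (!(pyIsLowerLetter c || pyIsNumber c)) = true
    · have hL : pyIsLowerLetter c = false := by
        by_contra h; simp only [Bool.not_eq_false] at h; simp [h] at h1
      have hN : pyIsNumber c = false := by
        by_contra h; simp only [Bool.not_eq_false] at h; simp [h] at h1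
      rw [if_pos h1, ih]
      apply Prod.ext <;> simp [List.countP_cons, hL, hN] <;> push_cast <;> omega
    · rw [if_neg h1]
      by_cases hL : pyIsLowerLetter c = true
      · rw [if_pos hL, ih]
        apply Prod.ext <;> simp [List.countP_cons, hL] <;> push_cast <;> omega
      · rw [if_neg hL, ih]
        have hL' : pyIsLowerLetter c = false := by simpa using hL
        have hN : pyIsNumber c = true := by
          by_contra hn
          simp only [Bool.not_eq_true] at hn hL
          exact h1 (by simp [hn, hL])
        apply Prod.ext <;> simp [List.countP_cons, hL', hN] <;> push_cast <;> omega

-- a letter is never a digit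
theorem letter_not_number (c : Char) (h : pyIsLowerLetter c = true) : pyIsNumber c = false := by
  unfold pyIsLowerLetter at h
  unfold pyIsNumber
  simp at h ⊢
  omega

-- ===== VERDICT (by name: the statement is the Claim_ definition above) =====
theorem IsAtomicSentence_spec : Claim_equal_IsAtomicSentence := by
  intro e _ _
  unfold Spec_IsAtomicSentence IsAtomicSentence IsAtomicSentence_alt
  cases hl : e.toList with
  | nil => simp [PySem.Str.pyGet?, hl]
  | cons c0 rest =>
    have hget : PySem.Str.pyGet? e 0 = some c0 := by simp [PySem.Str.pyGet?, hl]
    rw [hget]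
    simp only [foldl_counts, List.drop_succ_cons, List.drop_zero, zero_add]
    by_cases hc0 : pyIsLowerLetter c0 = true
    · have hc0n : pyIsNumber c0 = false := letter_not_number c0 hc0
      have hLc : List.countP pyIsLowerLetter (c0 :: rest)
          = List.countP pyIsLowerLetter rest + 1 := by
        simp [List.countP_cons, hc0]
      have hBc : List.countP (fun c => !(pyIsLowerLetter c || pyIsNumber c)) (c0 :: rest)
          = List.countP (fun c => !(pyIsLowerLetter c || pyIsNumber c)) rest := by
        simp [hc0, hc0n]
      rw [hLc, hBc]
      by_cases hallT : rest.all pyIsNumber = true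
      · -- every char of rest is a digit: both sides true
        rw [hallT]
        have hall' := List.all_eq_true.mp hallT
        have h1 : rest.countP pyIsLowerLetter = 0 := by
          rw [List.countP_eq_zero]
          intro x hx
          have hn := hall' x hx
          cases hpl : pyIsLowerLetter x
          · simp
          · rw [letter_not_number x hpl] at hn
            exact absurd hn Bool.false_ne_true
        have h2 : rest.countP (fun c => !(pyIsLowerLetter c || pyIsNumber c)) = 0 := by
          rw [List.countP_eq_zero]
          intro x hx
          have := hall' x hx
          simp [this]
        rw [h1, h2]
        simp [hc0]
      · -- some char of rest is not a digit: both sides false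
        have hall : rest.all pyIsNumber = false := by simpa using hallT
        rw [hall]
        obtain ⟨x, hx, hxn⟩ : ∃ x ∈ rest, pyIsNumber x = false := by
          simpa using List.all_eq_false.mp hall
        simp only [hc0, Bool.true_and, Bool.and_eq_false_iff, Bool.not_eq_false',
          decide_eq_true_eq]
        by_cases hxl : pyIsLowerLetter x = true
        · left
          have : 0 < rest.countP pyIsLowerLetter := List.countP_pos_iff.mpr ⟨x, hx, hxl⟩
          push_cast; omega
        · right
          have hxl' : pyIsLowerLetter x = false := by simpa using hxl
          have hb : (fun c => !(pyIsLowerLetter c || pyIsNumber c)) x = true := by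
            simp [hxl', hxn]
          have : 0 < rest.countP (fun c => !(pyIsLowerLetter c || pyIsNumber c)) :=
            List.countP_pos_iff.mpr ⟨x, hx, hb⟩
          push_cast; omega
    · -- first char not a lowercase letter: both sides false
      have hc0' : pyIsLowerLetter c0 = false := by simpa using hc0
      simp [hc0']
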